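-- pv_equiv track=rewrite | github.com/DeepakBadarinath/Value-Interpretable-Dynamic-Treatment-Regimes | disjoint_box_union.py | generate_k_tuples
-- ===== SOURCE A (Python) =====
-- import itertools
--
-- def generate_k_tuples(array_list, k):
--     '''
--     Given a list of lists, return all possible k-tuples from the list of lists,
--     and also return the indices.
--
--     Parameters:
--     -----------------------------------------------------------------------
--     lists : list[list]
--             The list of lists we wish to sample from
--     k : int
--         The number of elements we want to look at in the tuples
--
--     Returns:
--     -----------------------------------------------------------------------
--     results : tuple
--               The tuple which denotes the values and the indices we wish to
--               sample from
--
--     '''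
--     # Step 3: Generate all possible combinations of indices of size k
--     index_combinations = list(itertools.combinations(range(len(array_list)), k))
--
--     # Step 4: Generate all possible k-tuples for each combination
--     all_k_tuples = []
--     for indices in index_combinations:
--         # Extract the sub-arrays corresponding to the current combination of indices
--         sub_arrays = []
--         for i in indices:
--             cart_arr = itertools.product(array_list[i], repeat = 2)
--             unequal_tuples = [tup for tup in cart_arr if tup[0]<tup[1]]
--             sub_arrays.append(unequal_tuples)
--
--         # Generate all possible k-tuples from the sub-arrays
--         k_tuples = list(itertools.product(*sub_arrays))
--         # Store the results
--         all_k_tuples.append((indices, k_tuples))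
--
--
--     return all_k_tuples
-- ===== SOURCE B (Python) =====
-- def generate_k_tuples(array_list, k):
--     # Single recursive enumerator: picks the next index and builds the product
--     # tuples while recursing, instead of itertools.combinations + product.
--     n = len(array_list)
--
--     def rec(start, r):
--         if r == 0:
--             return [((), [()])]
--         out = []
--         for j in range(start, n - r + 1):
--             row = array_list[j]
--             pj = [(a, b) for a in row for b in row if a < b]
--             for idx, tups in rec(j + 1, r - 1):
--                 out.append(((j,) + idx, [(p,) + t for p in pj for t in tups]))
--         return out
--
--     return rec(0, k)
-- ===== Notes on version B (the rewrite author's own statement) =====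
-- stated objective: alternative
-- what changed: B replaces itertools.combinations plus itertools.product with one recursive enumerator that chooses the next index and assembles the product tuples while recursing, with no itertools at all.
import Mathlib
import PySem

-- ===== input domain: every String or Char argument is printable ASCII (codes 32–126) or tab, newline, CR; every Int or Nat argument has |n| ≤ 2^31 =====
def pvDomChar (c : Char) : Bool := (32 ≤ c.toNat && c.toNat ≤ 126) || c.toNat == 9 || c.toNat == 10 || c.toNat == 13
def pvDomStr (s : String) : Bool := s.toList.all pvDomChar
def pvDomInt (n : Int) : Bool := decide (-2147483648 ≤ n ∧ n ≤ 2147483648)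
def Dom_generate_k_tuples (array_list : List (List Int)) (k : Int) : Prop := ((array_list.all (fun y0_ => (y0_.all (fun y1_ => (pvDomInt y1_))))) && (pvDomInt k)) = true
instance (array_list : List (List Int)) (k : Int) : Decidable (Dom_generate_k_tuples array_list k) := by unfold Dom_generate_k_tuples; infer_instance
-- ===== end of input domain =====

-- B replaces itertools.combinations + itertools.product with one recursive enumerator
-- that picks the next index and assembles the product tuples while recursing (alternative decomposition).

-- ===== PORT A =====
-- itertools.combinations(range, k) over a list of Int indices, in Python's order
def pvCombinations {α : Type} : Nat → List α → List (List α)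
  | 0, _ => [[]]
  | _ + 1, [] => []
  | r + 1, x :: xs => ((pvCombinations r xs).map (fun c => x :: c)) ++ pvCombinations (r + 1) xs

-- [tup for tup in itertools.product(row, repeat=2) if tup[0] < tup[1]]
def pvPairsA (row : List Int) : List (Int × Int) :=
  (row.flatMap (fun a => row.map (fun b => (a, b)))).filter (fun t => t.1 < t.2)

-- list(itertools.product(*sub_arrays))
def pvProd : List (List (Int × Int)) → List (List (Int × Int))
  | [] => [[]]
  | l :: ls => l.flatMap (fun x => (pvProd ls).map (fun t => x :: t))

def generate_k_tuples (array_list : List (List Int)) (k : Int) : List (List Int × (List (List (Int × Int)))) :=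
  -- k.toNat: Pre_ requires 0 ≤ k (A raises ValueError otherwise)
  (pvCombinations k.toNat (PySem.List.pyRange 0 array_list.length 1)).map (fun indices =>
    -- array_list[i]: pyGetD is exact here, i ranges over range(len(array_list))
    (indices, pvProd (indices.map (fun i => pvPairsA (PySem.List.pyGetD array_list i [])))))

-- ===== PORT B =====
-- [(a, b) for a in row for b in row if a < b]
def pvPairsB (row : List Int) : List (Int × Int) :=
  row.flatMap (fun a => row.filterMap (fun b => if a < b then some (a, b) else none))

-- rec(start, r): recursion on r (Python recurses on r - 1; r ≥ 0 under Pre_)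
def pvRecB (al : List (List Int)) (n : Int) : Int → Nat → List (List Int × (List (List (Int × Int))))
  | _, 0 => [([], [[]])]
  | start, r + 1 =>
    -- range(start, n - r + 1) with Python's r = Lean's r + 1
    (PySem.List.pyRange start (n - ((r : Int) + 1) + 1) 1).flatMap (fun j =>
      -- array_list[j]: pyGetD exact, j in range(start, n - r + 1) ⊆ range(len)
      let pj := pvPairsB (PySem.List.pyGetD al j [])
      (pvRecB al n (j + 1) r).map (fun p =>
        (j :: p.1, pj.flatMap (fun q => p.2.map (fun t => q :: t)))))

def generate_k_tuples_alt (array_list : List (List Int)) (k : Int) : List (List Int × (List (List (Int × Int)))) :=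
  pvRecB array_list array_list.length 0 k.toNat

-- ===== PRECONDITION & SPEC =====
-- Pre_ excludes only k < 0, on which Python A raises ValueError (itertools.combinations).
def Pre_generate_k_tuples (_array_list : List (List Int)) (k : Int) : Prop := 0 ≤ k
instance (array_list : List (List Int)) (k : Int) : Decidable (Pre_generate_k_tuples array_list k) := by unfold Pre_generate_k_tuples; infer_instance
def pvWitness_generate_k_tuples : List (List Int) × Int := ([[1, 2], [3, 1]], 1)

def Spec_generate_k_tuples (array_list : List (List Int)) (k : Int) (out : List (List Int × (List (List (Int × Int))))) : Prop := out = generate_k_tuples_alt array_list k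
instance (array_list : List (List Int)) (k : Int) (out : List (List Int × (List (List (Int × Int))))) : Decidable (Spec_generate_k_tuples array_list k out) := by unfold Spec_generate_k_tuples; infer_instance

-- ===== CLAIM (what is proved, stated in full; the proofs are below) =====
def Claim_equal_generate_k_tuples : Prop := ∀ (array_list : List (List Int)) (k : Int), Dom_generate_k_tuples array_list k → Pre_generate_k_tuples array_list k → Spec_generate_k_tuples array_list k (generate_k_tuples array_list k)

-- ===== LEMMAS AND PROOFS =====

theorem pvInner (a : Int) (l : List Int) :
    l.filterMap (fun b => if a < b then some (a, b) else none)
      = (l.map (fun b => (a, b))).filter (fun t => t.1 < t.2) := by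
  induction l with
  | nil => rfl
  | cons b t ih => by_cases h : a < b <;> simp [h, ih]

theorem pvPairs_eq (row : List Int) : pvPairsB row = pvPairsA row := by
  unfold pvPairsA pvPairsB
  rw [List.filter_flatMap]
  simp only [pvInner]

theorem pvCombs_nil_of_lt {α : Type} : ∀ (l : List α) (r : Nat), l.length < r → pvCombinations r l = [] := by
  intro l
  induction l with
  | nil => intro r hr; cases r with
    | zero => omega
    | succ r' => rfl
  | cons x xs ih =>
      intro r hr
      cases r with
      | zero => omega
      | succ r' =>
        simp only [pvCombinations]
        rw [ih r' (by simpa using hr), ih (r' + 1) (by simp at hr; omega)]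
        rfl

-- combinations of size r+1 from range(start, n) = pick the first index j, recurse on range(j+1, n)
theorem pvCombs_range (n : Int) (r : Nat) : ∀ (m : Nat) (start : Int), (n - start).toNat ≤ m →
    pvCombinations (r + 1) (PySem.List.pyRange start n 1)
      = (PySem.List.pyRange start (n - (r : Int)) 1).flatMap (fun j =>
          (pvCombinations r (PySem.List.pyRange (j + 1) n 1)).map (fun c => j :: c)) := by
  intro m
  induction m with
  | zero =>
      intro start h
      have hns : n ≤ start := by omega
      rw [PySem.List.pyRange_one_eq_nil hns, PySem.List.pyRange_one_eq_nil (by omega)]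
      rfl
  | succ m ih =>
      intro start h
      by_cases hs : n - (r : Int) ≤ start
      · -- range(start, n) too short for r+1 elements; both sides empty
        rw [pvCombs_nil_of_lt _ (r + 1) (by rw [PySem.List.length_pyRange_one]; omega),
          PySem.List.pyRange_one_eq_nil hs]
        rfl
      · have hlt : start < n := by omega
        rw [PySem.List.pyRange_one_cons hlt, PySem.List.pyRange_one_cons (by omega : start < n - (r : Int))]
        simp only [pvCombinations, List.flatMap_cons]
        rw [ih (start + 1) (by omega)]

theorem pvRecB_eq (al : List (List Int)) (n : Int) (r : Nat) : ∀ (start : Int),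
    pvRecB al n start r
      = (pvCombinations r (PySem.List.pyRange start n 1)).map (fun idx =>
          (idx, pvProd (idx.map (fun i => pvPairsA (PySem.List.pyGetD al i []))))) := by
  induction r with
  | zero => intro start; simp [pvRecB, pvCombinations, pvProd]
  | succ r ih =>
      intro start
      show (PySem.List.pyRange start (n - ((r : Int) + 1) + 1) 1).flatMap _ = _
      rw [pvCombs_range n r (n - start).toNat start le_rfl]
      have harg : n - ((r : Int) + 1) + 1 = n - (r : Int) := by ring
      rw [harg, List.map_flatMap]
      refine List.flatMap_congr (fun j _ => ?_)
      rw [ih (j + 1)]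
      simp only [List.map_map, Function.comp_def, pvPairs_eq, List.map_cons, pvProd]

theorem gen_eq (al : List (List Int)) (k : Int) :
    generate_k_tuples_alt al k = generate_k_tuples al k := by
  unfold generate_k_tuples generate_k_tuples_alt
  rw [pvRecB_eq]

-- ===== VERDICT (by name: the statement is the Claim_ definition above) =====
theorem generate_k_tuples_spec : Claim_equal_generate_k_tuples := by
  intro al k _ _
  unfold Spec_generate_k_tuples
  exact (gen_eq al k).symm
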